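-- pv_equiv track=rewrite | github.com/BruthYU/PI-Fed | fed_trainer.py | switch_tag
-- ===== SOURCE A (Python) =====
-- def switch_tag(num_clients, num_batches):
--     assert num_clients < num_batches, "Exception: num clients > num_batches !"
--     tags = []
--     batch_per_client = num_batches // num_clients
--     for client_id in range(num_clients):
--         tags.append((client_id + 1) * batch_per_client)
--     tags[-1] += num_batches % num_clients
--     return tags
-- ===== SOURCE B (Python) =====
-- from itertools import accumulate
--
-- def switch_tag(num_clients, num_batches):
--     assert num_clients < num_batches, "Exception: num clients > num_batches !"
--     counts = [num_batches // num_clients] * num_clients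
--     counts[-1] += num_batches % num_clients
--     return list(accumulate(counts))
-- ===== Notes on version B (the rewrite author's own statement) =====
-- stated objective: alternative
-- what changed: A computes each tag directly as (client_id+1)*batch_per_client and patches the last entry afterwards; B first builds a per-client batch-count list (equal shares, remainder added to the last count) and returns its running prefix sums via itertools.accumulate.
import Mathlib
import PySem

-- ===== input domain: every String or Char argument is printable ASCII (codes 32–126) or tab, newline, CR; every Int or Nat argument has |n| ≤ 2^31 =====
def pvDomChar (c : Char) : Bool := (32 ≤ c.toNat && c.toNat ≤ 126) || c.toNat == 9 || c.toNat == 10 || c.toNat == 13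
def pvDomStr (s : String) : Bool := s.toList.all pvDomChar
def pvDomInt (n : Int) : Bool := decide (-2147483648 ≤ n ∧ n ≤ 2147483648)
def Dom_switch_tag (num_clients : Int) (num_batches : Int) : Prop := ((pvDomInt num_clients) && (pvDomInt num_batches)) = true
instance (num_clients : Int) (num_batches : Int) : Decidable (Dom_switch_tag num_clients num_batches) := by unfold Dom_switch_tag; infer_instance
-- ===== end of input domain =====

-- B replaces A's closed-form per-index tags ((i+1)*batch_per_client with a patched last slot)
-- by a per-client count list whose running prefix sum yields the tags (different decomposition; same cost).


-- shared helper: Python's `t[-1] += x` on a nonempty list (empty list raises IndexError in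
-- both Pythons; excluded by Pre_, the helper returns [] there)
def pvIncLast (t : List Int) (x : Int) : List Int :=
  match t.getLast? with
  | some v => t.dropLast ++ [v + x]
  | none => []

-- ===== PORT A =====
def switch_tag (num_clients : Int) (num_batches : Int) : List Int :=
  let batch_per_client := PySem.Int.floordiv num_batches num_clients
  let tags := (PySem.List.pyRange 0 num_clients 1).foldl
    (fun acc client_id => acc ++ [(client_id + 1) * batch_per_client]) []
  pvIncLast tags (PySem.Int.mod num_batches num_clients)

-- ===== PORT B =====
def switch_tag_alt (num_clients : Int) (num_batches : Int) : List Int :=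
  let counts := List.replicate num_clients.toNat (PySem.Int.floordiv num_batches num_clients)
  let counts := pvIncLast counts (PySem.Int.mod num_batches num_clients)
  -- itertools.accumulate: fold keeping (output so far, running total)
  (counts.foldl (fun (p : List Int × Int) c => (p.1 ++ [p.2 + c], p.2 + c)) ([], 0)).1

-- ===== PRECONDITION & SPEC =====
-- A (and B) raise outside 0 < num_clients < num_batches: the assert fires when
-- num_clients ≥ num_batches, num_clients = 0 divides by zero, num_clients < 0 hits
-- tags[-1] on an empty list (IndexError).
def Pre_switch_tag (num_clients : Int) (num_batches : Int) : Prop :=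
  0 < num_clients ∧ num_clients < num_batches
instance (num_clients : Int) (num_batches : Int) : Decidable (Pre_switch_tag num_clients num_batches) := by unfold Pre_switch_tag; infer_instance
def pvWitness_switch_tag : Int × Int := (3, 10)

def Spec_switch_tag (num_clients : Int) (num_batches : Int) (out : List Int) : Prop := out = switch_tag_alt num_clients num_batches
instance (num_clients : Int) (num_batches : Int) (out : List Int) : Decidable (Spec_switch_tag num_clients num_batches out) := by unfold Spec_switch_tag; infer_instance

-- ===== CLAIM (what is proved, stated in full; the proofs are below) =====
def Claim_equal_switch_tag : Prop := ∀ (num_clients : Int) (num_batches : Int), Dom_switch_tag num_clients num_batches → Pre_switch_tag num_clients num_batches → Spec_switch_tag num_clients num_batches (switch_tag num_clients num_batches)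

-- ===== LEMMAS AND PROOFS =====

-- A's loop appends one element per index: it is a map.
theorem pv_foldl_append_map (f : Int → Int) :
    ∀ (l : List Int) (acc : List Int),
      l.foldl (fun a x => a ++ [f x]) acc = acc ++ l.map f := by
  intro l
  induction l with
  | nil => intro acc; simp
  | cons x xs ih => intro acc; simp [List.foldl, ih]

-- B's accumulate-fold over a constant block: prefix sums of `replicate k c` from total s.
theorem pv_accum_replicate (c : Int) :
    ∀ (k : Nat) (acc : List Int) (s : Int),
      (List.replicate k c).foldl (fun (p : List Int × Int) x => (p.1 ++ [p.2 + x], p.2 + x)) (acc, s)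
        = (acc ++ (List.range k).map (fun i : Nat => s + ((i : Int) + 1) * c), s + (k : Int) * c) := by
  intro k
  induction k with
  | zero => intro acc s; simp
  | succ n ih =>
    intro acc s
    rw [List.replicate_succ, List.foldl_cons, ih]
    rw [Prod.mk.injEq]
    refine ⟨?_, by push_cast; ring⟩
    rw [List.range_succ_eq_map]
    simp only [List.map_cons, List.map_map, Nat.cast_zero, zero_add, one_mul,
      List.append_assoc, List.singleton_append]
    congr 1
    congr 1
    apply List.map_congr_left
    intro i _
    simp only [Function.comp_apply, Nat.succ_eq_add_one]
    push_cast
    ring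

theorem switch_tag_eq (nc nb : Int) (h1 : 0 < nc) :
    switch_tag nc nb = switch_tag_alt nc nb := by
  obtain ⟨n, rfl⟩ : ∃ n : Nat, nc = (n : Int) := ⟨nc.toNat, (Int.toNat_of_nonneg h1.le).symm⟩
  have hn : 0 < n := by exact_mod_cast h1
  obtain ⟨k, rfl⟩ : ∃ k, n = k + 1 := ⟨n - 1, by omega⟩
  unfold switch_tag switch_tag_alt
  dsimp only
  set bpc := PySem.Int.floordiv nb ((k + 1 : Nat) : Int) with hbpc
  set m := PySem.Int.mod nb ((k + 1 : Nat) : Int) with hm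
  -- A side
  rw [PySem.List.pyRange_one, pv_foldl_append_map]
  have hsub : (((k + 1 : Nat) : Int) - 0).toNat = k + 1 := by omega
  rw [hsub, List.map_map]
  set f : Nat → Int := fun i => ((0 + (i : Int)) + 1) * bpc with hf
  have hfeq : ((fun client_id => (client_id + 1) * bpc) ∘ fun j : Nat => (0 : Int) + (j : Int)) = f := by
    funext i; simp [hf]
  rw [hfeq]
  have hA : pvIncLast ((List.range (k+1)).map f) m
      = (List.range k).map f ++ [((k : Int) + 1) * bpc + m] := by
    rw [List.range_succ, List.map_append]
    unfold pvIncLast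
    simp [hf]
  rw [List.nil_append, hA]
  -- B side
  have hBn : ((k + 1 : Nat) : Int).toNat = k + 1 := by omega
  rw [hBn]
  have hrep : pvIncLast (List.replicate (k+1) bpc) m
      = List.replicate k bpc ++ [bpc + m] := by
    rw [List.replicate_succ']
    unfold pvIncLast
    rw [List.getLast?_concat, List.dropLast_concat]
  rw [hrep, List.foldl_append, pv_accum_replicate]
  simp only [List.nil_append, List.foldl_cons, List.foldl_nil]
  congr 1
  · apply List.map_congr_left
    intro i _
    simp [hf]
  · simp
    ring

-- ===== VERDICT (by name: the statement is the Claim_ definition above) =====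
theorem switch_tag_spec : Claim_equal_switch_tag := by
  intro nc nb _ hpre
  unfold Spec_switch_tag
  exact switch_tag_eq nc nb hpre.1
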